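-- pv_equiv track=rewrite | github.com/clovr/vappio | vappio-twisted/vappio_tx/load/sge_queue.py | _parseSGEConf
-- ===== SOURCE A (Python) =====
-- def _parseSGEConf(data):
--     lines = data.split('\n')
--
--     multiline = False
--     ret = {}
--
--     for line in lines:
--         line = line.strip()
--
--         if line:
--             if not multiline:
--                 key, value = line.split(' ', 1)
--                 value = value.strip().rstrip('\\')
--                 ret[key] = value
--             else:
--                 # Making use of the fact that the key was created
--                 # in the previous iteration and is stil lin scope
--                 ret[key] += line
--
--             multiline = (line[-1] == '\\')
--
--     return ret
-- ===== SOURCE B (Python) =====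
-- def _parseSGEConf(data):
--     lines = [l for l in (line.strip() for line in data.split('\n')) if l]
--     ret = {}
--     i = 0
--     n = len(lines)
--     while i < n:
--         line = lines[i]
--         key, value = line.split(' ', 1)
--         value = value.strip().rstrip('\\')
--         cont = line.endswith('\\')
--         i += 1
--         while cont and i < n:
--             value += lines[i]
--             cont = lines[i].endswith('\\')
--             i += 1
--         ret[key] = value
--     return ret
-- ===== Notes on version B (the rewrite author's own statement) =====
-- stated objective: alternative
-- what changed: Replaces A's flat single-pass state machine (a multiline flag and the current key carried across iterations, with repeated in-place dict appends) by first filtering the stripped non-empty lines and then an explicit outer/inner grouping loop that assembles each full value before a single dict store per key.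
import Mathlib
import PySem

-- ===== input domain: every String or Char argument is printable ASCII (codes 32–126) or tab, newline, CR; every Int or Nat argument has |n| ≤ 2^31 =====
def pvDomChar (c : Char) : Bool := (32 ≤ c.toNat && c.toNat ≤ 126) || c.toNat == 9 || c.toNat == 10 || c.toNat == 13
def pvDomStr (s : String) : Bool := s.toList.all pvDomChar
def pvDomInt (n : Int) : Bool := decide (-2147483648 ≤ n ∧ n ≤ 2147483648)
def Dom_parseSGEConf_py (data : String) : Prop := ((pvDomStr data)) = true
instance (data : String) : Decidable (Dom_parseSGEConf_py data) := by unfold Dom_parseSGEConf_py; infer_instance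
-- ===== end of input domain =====

-- B replaces A's flat multiline-flag state machine by a filter of the stripped
-- lines followed by an explicit outer/inner grouping loop (objective: alternative
-- decomposition, same cost).

-- ===== PORT A =====
-- shared hand-port of Python's  s.rstrip('\\')  (drop all trailing backslashes; exact:
-- rstrip with a chars argument removes every trailing char in that set)
def pvRstripBS (s : String) : String :=
  String.ofList ((s.toList.reverse.dropWhile (fun c => c == '\\')).reverse)

-- key/value extraction of a key line: split once at the first space, then strip the value
-- and drop its trailing backslashes.
-- On a line without ' ' Python raises ValueError (excluded by Pre_); here the value part is then "".
def pvKeyVal (l : String) : String × String :=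
  let ps := (PySem.Str.splitMax? l " " 1).getD []
  (ps.headD "", pvRstripBS (PySem.Str.strip ((ps.drop 1).headD "")))

-- A's loop body; state = (multiline, key, ret).  'ret[key] += line' is ported as
-- Dict.modify key "" (· ++ l): exact here because the key is always present when the
-- multiline branch runs (it was inserted in a previous iteration).
def pvStepA (s : Bool × String × PySem.Dict String String) (line : String) :
    Bool × String × PySem.Dict String String :=
  let l := PySem.Str.strip line
  if l = "" then s
  else if s.1 = false then
    let kv := pvKeyVal l
    (decide (PySem.Str.pyGet? l (-1) = some '\\'), kv.1, s.2.2.insert kv.1 kv.2)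
  else
    (decide (PySem.Str.pyGet? l (-1) = some '\\'), s.2.1, s.2.2.modify s.2.1 "" (· ++ l))

def parseSGEConf_py (data : String) : List (String × String) :=
  -- data.split('\n'): separator is nonempty, so split? is always `some`
  let lines := (PySem.Str.split? data "\n").getD []
  ((lines.foldl pvStepA (false, "", PySem.Dict.empty)).2.2).items

-- ===== PORT B =====
-- inner while loop: consume continuation lines while the previous line ended with '\'
def pvBCont (cont : Bool) (v : String) : List String → String × List String
  | [] => (v, [])
  | l :: t => if cont then pvBCont (PySem.Str.endswith l "\\") (v ++ l) t else (v, l :: t)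

theorem pvBCont_len (cont : Bool) (v : String) (t : List String) :
    (pvBCont cont v t).2.length ≤ t.length := by
  induction t generalizing cont v with
  | nil => simp [pvBCont]
  | cons l t ih =>
    by_cases h : cont = true
    · simpa [pvBCont, h] using Nat.le_succ_of_le (ih _ _)
    · simp at h; simp [pvBCont, h]

-- outer loop: one key line, then its continuation lines, one dict insert per group
def pvBMain (d : PySem.Dict String String) : List String → PySem.Dict String String
  | [] => d
  | l :: t =>
    let kv := pvKeyVal l
    let vr := pvBCont (PySem.Str.endswith l "\\") kv.2 t
    pvBMain (d.insert kv.1 vr.1) vr.2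
  termination_by ls => ls.length
  decreasing_by
    exact Nat.lt_succ_of_le (pvBCont_len _ _ _)

def parseSGEConf_py_alt (data : String) : List (String × String) :=
  let ls := (((PySem.Str.split? data "\n").getD []).map PySem.Str.strip).filter
    (fun l => l != "")
  (pvBMain PySem.Dict.empty ls).items

-- ===== PRECONDITION & SPEC =====
-- Pre_ excludes exactly the inputs on which Python A raises ValueError: those where some
-- key line (a nonempty stripped line that is first, or follows a line not ending in '\')
-- contains no space, so the two-way unpacking of that line fails.
def Pre_parseSGEConf_py (data : String) : Prop :=
  let ls := (((PySem.Str.split? data "\n").getD []).map PySem.Str.strip).filter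
    (fun l => l != "")
  ls ≠ [] →
    (PySem.Str.isIn " " (ls.headD "") = true ∧
     ∀ p ∈ ls.zip ls.tail, PySem.Str.endswith p.1 "\\" = false → PySem.Str.isIn " " p.2 = true)
instance (data : String) : Decidable (Pre_parseSGEConf_py data) := by
  unfold Pre_parseSGEConf_py; infer_instance

def pvWitness_parseSGEConf_py : String := "alpha 1 \\\n  2\nbeta x"

def Spec_parseSGEConf_py (data : String) (out : List (String × String)) : Prop :=
  out = parseSGEConf_py_alt data
instance (data : String) (out : List (String × String)) : Decidable (Spec_parseSGEConf_py data out) := by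
  unfold Spec_parseSGEConf_py; infer_instance

-- ===== CLAIM (what is proved, stated in full; the proofs are below) =====
def Claim_equal_parseSGEConf_py : Prop := ∀ (data : String), Dom_parseSGEConf_py data → Pre_parseSGEConf_py data → Spec_parseSGEConf_py data (parseSGEConf_py data)

-- ===== LEMMAS AND PROOFS =====

-- proof-side version of A's loop body on an already-stripped nonempty line,
-- with the multiline flag written as endswith
def pvCore (s : Bool × String × PySem.Dict String String) (l : String) :
    Bool × String × PySem.Dict String String :=
  if s.1 = false then
    let kv := pvKeyVal l
    (PySem.Str.endswith l "\\", kv.1, s.2.2.insert kv.1 kv.2)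
  else
    (PySem.Str.endswith l "\\", s.2.1, s.2.2.modify s.2.1 "" (· ++ l))

-- line[-1] == '\\' is endswith '\' (both are false on the empty string)
theorem pvLast_endswith (l : String) :
    decide (PySem.Str.pyGet? l (-1) = some '\\') = PySem.Str.endswith l "\\" := by
  have htl : ("\\" : String).toList = ['\\'] := rfl
  have hiff : PySem.Str.pyGet? l (-1) = some '\\' ↔ PySem.Str.endswith l "\\" = true := by
    rw [PySem.Str.pyGet?_eq, PySem.Chars.pyGet?_eq_listPyGet?, PySem.List.pyGet?_neg_one,
        PySem.Str.endswith_eq, htl, PySem.Chars.endswith_iff]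
    constructor
    · intro hc
      obtain ⟨l', hl'⟩ := List.getLast?_eq_some_iff.mp hc
      exact ⟨l', hl'.symm⟩
    · rintro ⟨t, ht⟩
      exact List.getLast?_eq_some_iff.mpr ⟨t, ht.symm⟩
  cases hb : PySem.Str.endswith l "\\" with
  | true => rw [decide_eq_true_eq]; exact hiff.mpr hb
  | false => exact decide_eq_false (fun hc => by rw [hiff.mp hc] at hb; cases hb)
-- A's fold over the raw lines is pvCore folded over the stripped nonempty lines
theorem pvFoldA_eq (lines : List String) (s : Bool × String × PySem.Dict String String) :
    lines.foldl pvStepA s =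
      ((lines.map PySem.Str.strip).filter (fun l => l != "")).foldl pvCore s := by
  induction lines generalizing s with
  | nil => rfl
  | cons l t ih =>
    by_cases h : PySem.Str.strip l = ""
    · simp [pvStepA, h, ih]
    · have hstep : pvStepA s l = pvCore s (PySem.Str.strip l) := by
        simp only [pvStepA, pvCore, pvLast_endswith, h, if_false]
      simp [h, hstep, ih]

-- insert-then-append is insert of the concatenation
theorem pvInsert_modify (d : PySem.Dict String String) (k v s : String) :
    (d.insert k v).modify k "" (· ++ s) = d.insert k (v ++ s) := by
  rw [PySem.Dict.modify, PySem.Dict.getD_insert_self, PySem.Dict.insert_insert_self]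

-- the multiline run of pvCore is B's inner loop
theorem pvCont_eq (t : List String) (cont : Bool) (k : String) (v : String)
    (d : PySem.Dict String String) :
    (t.foldl pvCore (cont, k, d.insert k v)).2.2 =
      ((pvBCont cont v t).2.foldl pvCore (false, k, d.insert k (pvBCont cont v t).1)).2.2 := by
  induction t generalizing cont v d with
  | nil => cases cont <;> simp [pvBCont]
  | cons l t ih =>
    cases cont with
    | false => simp [pvBCont]
    | true =>
      have hstep : pvCore (true, k, d.insert k v) l =
          (PySem.Str.endswith l "\\", k, d.insert k (v ++ l)) := by
        simp [pvCore, pvInsert_modify]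
      simp only [List.foldl_cons, hstep, pvBCont]
      exact ih _ _ _

-- main induction: the state machine equals the grouping loop
theorem pvMain_eq (d : PySem.Dict String String) (ls : List String) :
    ∀ k0 : String, (ls.foldl pvCore (false, k0, d)).2.2 = pvBMain d ls := by
  induction d, ls using pvBMain.induct with
  | case1 d => intro k0; simp [pvBMain]
  | case2 d l t kv vr ih =>
    intro k0
    have hstep : pvCore (false, k0, d) l =
        (PySem.Str.endswith l "\\", kv.1, d.insert kv.1 kv.2) := by
      simp [pvCore, kv]
    rw [List.foldl_cons, hstep, pvCont_eq, ih, pvBMain]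

-- ===== VERDICT (by name: the statement is the Claim_ definition above) =====
theorem parseSGEConf_py_spec : Claim_equal_parseSGEConf_py := by
  intro data _ _
  unfold Spec_parseSGEConf_py parseSGEConf_py parseSGEConf_py_alt
  simp only [pvFoldA_eq, pvMain_eq]
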